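-- pv_equiv track=rewrite | github.com/chaosbaby/pymodule | cmdhelper/cmdhelper/wrapper.py | argsCombine
-- ===== SOURCE A (Python) =====
-- def argsCombine(args1, args2):
--     args = list(args1)
--     replaceArgs = list(args2)
--
--     for i in range(len(args1)):
--         if args1[i] == None:
--             args[i] = replaceArgs.pop(0)
--     args.extend(replaceArgs)
--     return args
-- ===== SOURCE B (Python) =====
-- def argsCombine(args1, args2):
--     # split args1 into maximal runs of non-None values (the None slots are the separators)
--     segs = [[]]
--     for x in args1:
--         if x == None:
--             segs.append([])
--         else:
--             segs[-1].append(x)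
--     # join the runs back, inserting args2[j-1] at the j-th separator, then append leftovers
--     out = list(segs[0])
--     for j in range(1, len(segs)):
--         out.append(args2[j - 1])
--         out.extend(segs[j])
--     out.extend(args2[len(segs) - 1:])
--     return out
-- ===== Notes on version B (the rewrite author's own statement) =====
-- stated objective: faster
-- what changed: B splits args1 into runs of non-None values (split-on-separator) and then joins the runs with args2 elements interleaved and leftovers appended, instead of A's single scan that mutates a copy of args1 and pop(0)'s the replacement list.
import Mathlib
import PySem

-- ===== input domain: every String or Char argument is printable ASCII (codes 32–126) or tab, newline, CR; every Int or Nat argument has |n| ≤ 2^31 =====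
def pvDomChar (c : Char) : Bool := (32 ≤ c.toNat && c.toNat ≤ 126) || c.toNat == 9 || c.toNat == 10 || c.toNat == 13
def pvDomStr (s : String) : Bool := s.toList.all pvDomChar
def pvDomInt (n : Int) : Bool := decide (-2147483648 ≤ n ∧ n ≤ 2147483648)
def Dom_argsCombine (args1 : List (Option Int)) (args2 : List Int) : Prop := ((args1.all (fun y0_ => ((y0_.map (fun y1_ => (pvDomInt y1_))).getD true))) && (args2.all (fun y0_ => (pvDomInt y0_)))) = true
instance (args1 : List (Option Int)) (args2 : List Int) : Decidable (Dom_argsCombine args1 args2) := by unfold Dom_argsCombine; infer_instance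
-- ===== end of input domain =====

-- B splits args1 into runs of non-None values and joins them back with args2 elements
-- interleaved at the separators, leftovers appended (objective: faster — A pop(0)s the replacement list).

-- ===== PORT A =====
-- one iteration of A's for-loop body: `if args1[i] == None: args[i] = replaceArgs.pop(0)`;
-- i is always in range of args1 (i ∈ range(len(args1))), so args1[i] is List.getD and
-- `args[i] = v` is List.set.  pop(0) on [] raises IndexError in Python (excluded by Pre_);
-- here the state is left unchanged on that branch.
def argsCombineStep (args1 : List (Option Int)) (st : List (Option Int) × List Int) (i : Nat) :
    List (Option Int) × List Int :=
  if args1.getD i (some 0) = none then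
    match st.2 with
    | y :: ys => (st.1.set i (some y), ys)
    | [] => st
  else st

def argsCombine (args1 : List (Option Int)) (args2 : List Int) : List (Option Int) :=
  -- args = list(args1); replaceArgs = list(args2); for i in range(len(args1)): …
  -- range(len(args1)) has a nonnegative bound, so List.range args1.length is exact.
  let st := (List.range args1.length).foldl (argsCombineStep args1) (args1, args2)
  st.1 ++ st.2.map (fun y => some y)   -- args.extend(replaceArgs); return args

-- ===== PORT B =====
-- `if x == None: segs.append([]) else: segs[-1].append(x)` — the split pass of Source B
def argsSegsStep (segs : List (List Int)) (x : Option Int) : List (List Int) :=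
  match x with
  | none => segs ++ [[]]
  | some a => segs.dropLast ++ [segs.getLastD [] ++ [a]]

-- the join pass `for j in range(1, len(segs)): out.append(args2[j-1]); out.extend(segs[j])`,
-- as the obvious recursion over segs[1:] carrying the running index into args2.
-- args2[j-1] raises IndexError in Python when out of range (excluded by Pre_); getD there.
def argsFill (args2 : List Int) (j : Nat) : List (List Int) → List Int
  | [] => []
  | seg :: rest => args2.getD j 0 :: (seg ++ argsFill args2 (j + 1) rest)

def argsCombine_alt (args1 : List (Option Int)) (args2 : List Int) : List (Option Int) :=
  let segs := args1.foldl argsSegsStep [[]]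
  -- out = list(segs[0]); join pass; out.extend(args2[len(segs)-1:]) — the slice index
  -- len(segs)-1 ≥ 0, so the slice is List.drop.
  (segs.headD [] ++ argsFill args2 0 segs.tail).map (fun y => some y)
    ++ (args2.drop (segs.length - 1)).map (fun y => some y)

-- ===== PRECONDITION & SPEC =====
-- Python A raises IndexError (pop from empty list) exactly when args1 has more None
-- slots than args2 has elements; those inputs are excluded (B also raises IndexError there).
def Pre_argsCombine (args1 : List (Option Int)) (args2 : List Int) : Prop :=
  args1.count none ≤ args2.length

instance (args1 : List (Option Int)) (args2 : List Int) : Decidable (Pre_argsCombine args1 args2) := by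
  unfold Pre_argsCombine; infer_instance

def pvWitness_argsCombine : List (Option Int) × List Int := ([none, some 1, none], [5, 7, 9])

def Spec_argsCombine (args1 : List (Option Int)) (args2 : List Int) (out : List (Option Int)) : Prop := out = argsCombine_alt args1 args2
instance (args1 : List (Option Int)) (args2 : List Int) (out : List (Option Int)) : Decidable (Spec_argsCombine args1 args2 out) := by unfold Spec_argsCombine; infer_instance

-- ===== CLAIM (what is proved, stated in full; the proofs are below) =====
def Claim_equal_argsCombine : Prop := ∀ (args1 : List (Option Int)) (args2 : List Int), Dom_argsCombine args1 args2 → Pre_argsCombine args1 args2 → Spec_argsCombine args1 args2 (argsCombine args1 args2)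

-- ===== LEMMAS AND PROOFS =====

-- proof-only middle form: the fill recursion both ports are proved equal to
def argsCombineGo : List (Option Int) → List Int → List (Option Int)
  | [], ys => ys.map (fun y => some y)
  | none :: xs, y :: ys => some y :: argsCombineGo xs ys
  | none :: xs, [] => none :: argsCombineGo xs []
  | some a :: xs, ys => some a :: argsCombineGo xs ys

-- ---- A-side: A's fold equals Go (unconditionally) ----
theorem argsCombine_foldl_shift (x : Option Int) (xs : List (Option Int)) (r : List Nat) :
    ∀ (h : Option Int) (t : List (Option Int)) (rep : List Int),
    (r.map Nat.succ).foldl (argsCombineStep (x :: xs)) (h :: t, rep) =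
      (h :: ((r.foldl (argsCombineStep xs) (t, rep)).1),
        (r.foldl (argsCombineStep xs) (t, rep)).2) := by
  induction r with
  | nil => intro h t rep; rfl
  | cons i r ih =>
      intro h t rep
      simp only [List.map_cons, List.foldl_cons]
      have hstep : argsCombineStep (x :: xs) (h :: t, rep) i.succ =
          (h :: (argsCombineStep xs (t, rep) i).1, (argsCombineStep xs (t, rep) i).2) := by
        simp only [argsCombineStep, List.getD_cons_succ]
        split_ifs with hc
        · cases rep with
          | nil => rfl
          | cons y ys => simp [List.set]
        · rfl
      rw [hstep]
      rcases hst : argsCombineStep xs (t, rep) i with ⟨t', rep'⟩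
      simpa using ih h t' rep'

theorem argsCombine_eq_go (args1 : List (Option Int)) :
    ∀ (args2 : List Int), argsCombine args1 args2 = argsCombineGo args1 args2 := by
  induction args1 with
  | nil => intro args2; simp [argsCombine, argsCombineGo]
  | cons x xs ih =>
      intro args2
      simp only [argsCombine, List.length_cons, List.range_succ_eq_map, List.foldl_cons]
      have hstep0 : argsCombineStep (x :: xs) (x :: xs, args2) 0 =
          match x, args2 with
          | none, y :: ys => (some y :: xs, ys)
          | none, [] => (x :: xs, [])
          | some a, ys => (x :: xs, ys) := by
        cases x with
        | none => cases args2 <;> simp [argsCombineStep, List.set]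
        | some a => simp [argsCombineStep]
      cases x with
      | none =>
          cases args2 with
          | nil =>
              rw [hstep0, argsCombine_foldl_shift]
              simpa [argsCombine, argsCombineGo] using ih []
          | cons y ys =>
              rw [hstep0, argsCombine_foldl_shift]
              simpa [argsCombine, argsCombineGo] using ih ys
      | some a =>
          rw [hstep0, argsCombine_foldl_shift]
          simpa [argsCombine, argsCombineGo] using ih args2

-- ---- B-side lemmas ----
-- the split fold never touches an accumulated prefix of finished segments
theorem argsSegs_prefix (xs : List (Option Int)) :
    ∀ (segs : List (List Int)) (cur : List Int),
    xs.foldl argsSegsStep (segs ++ [cur]) = segs ++ xs.foldl argsSegsStep [cur] := by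
  induction xs with
  | nil => intro segs cur; rfl
  | cons x xs ih =>
      intro segs cur
      cases x with
      | none =>
          simp only [List.foldl_cons, argsSegsStep]
          rw [ih (segs ++ [cur]) [], ih [cur] []]
          simp
      | some a =>
          simp only [List.foldl_cons, argsSegsStep]
          rw [List.dropLast_concat, List.getLastD_concat]
          have : ([cur].dropLast ++ [[cur].getLastD [] ++ [a]]) = [cur ++ [a]] := by simp
          rw [this, ih segs]

-- shape of the split: starting from [cur] the first segment gains the prefix cur,
-- and the number of finished separators equals the count of None in xs
theorem argsSegs_char (xs : List (Option Int)) :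
    ∀ (cur : List Int), ∃ h t,
      xs.foldl argsSegsStep [cur] = (cur ++ h) :: t ∧
      xs.foldl argsSegsStep [[]] = h :: t ∧
      t.length = xs.count none := by
  induction xs with
  | nil => intro cur; exact ⟨[], [], by simp, by simp, by simp⟩
  | cons x xs ih =>
      intro cur
      cases x with
      | none =>
          refine ⟨[], xs.foldl argsSegsStep [[]], ?_, ?_, ?_⟩
          · have : argsSegsStep [cur] none = [cur] ++ [[]] := by simp [argsSegsStep]
            simp only [List.foldl_cons, this, argsSegs_prefix]
            simp
          · have : argsSegsStep [[]] none = [[]] ++ [[]] := by simp [argsSegsStep]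
            simp only [List.foldl_cons, this, argsSegs_prefix]
            rfl
          · obtain ⟨h, t, _, h2, h3⟩ := ih []
            rw [h2]
            simp [h3]
      | some a =>
          obtain ⟨h, t, h1, h2, h3⟩ := ih (cur ++ [a])
          obtain ⟨h', t', h1', h2', h3'⟩ := ih [a]
          have hh : h = h' ∧ t = t' := by
            have := h2.symm.trans h2'
            exact ⟨by simpa using congrArg (fun l => l.headD []) this,
                   by simpa using congrArg List.tail this⟩
          refine ⟨[a] ++ h, t, ?_, ?_, ?_⟩
          · have : argsSegsStep [cur] (some a) = [cur ++ [a]] := by simp [argsSegsStep]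
            simp only [List.foldl_cons, this]
            rw [h1]; simp
          · have : argsSegsStep [[]] (some a) = [[a]] := by simp [argsSegsStep]
            simp only [List.foldl_cons, this]
            rw [← hh.1, ← hh.2] at h1'
            rw [h1']
          · simpa [List.count_cons] using h3
      -- note: count none (some a :: xs) = count none xs

-- the join pass shifts: consuming one element of args2 lowers every index by one
theorem argsFill_shift (y : Int) (ys : List Int) :
    ∀ (rest : List (List Int)) (j : Nat),
    argsFill (y :: ys) (j + 1) rest = argsFill ys j rest := by
  intro rest
  induction rest with
  | nil => intro j; rfl
  | cons seg r ih => intro j; simp [argsFill, ih]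

-- B equals Go wherever args1 has no more None slots than args2 has elements
theorem argsCombine_alt_eq_go (args1 : List (Option Int)) :
    ∀ (args2 : List Int), args1.count none ≤ args2.length →
    argsCombine_alt args1 args2 = argsCombineGo args1 args2 := by
  induction args1 with
  | nil => intro args2 _; simp [argsCombine_alt, argsCombineGo, argsFill]
  | cons x xs ih =>
      intro args2 hpre
      obtain ⟨h, t, _, h2, h3⟩ := argsSegs_char xs []
      cases x with
      | none =>
          cases args2 with
          | nil => simp at hpre
          | cons y ys =>
              have hsegs : (none :: xs).foldl argsSegsStep [[]] = [] :: h :: t := by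
                have : argsSegsStep [[]] none = [[]] ++ [[]] := by simp [argsSegsStep]
                simp only [List.foldl_cons, this, argsSegs_prefix]
                rw [h2]; rfl
              have hpre' : xs.count none ≤ ys.length := by
                simp at hpre; omega
              have := ih ys hpre'
              simp only [argsCombine_alt, hsegs, h2] at this ⊢
              simp only [List.headD, List.tail, argsFill, List.length_cons]
              rw [argsFill_shift]
              simp only [List.getD, List.getElem?_cons_zero, Option.getD_some]
              simp only [List.nil_append] at this ⊢
              rw [List.map_cons]
              simp only [List.length_cons] at this
              rw [show t.length + 2 - 1 = t.length + 1 from rfl, List.drop_succ_cons]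
              simp only [Nat.add_sub_cancel] at this
              rw [argsCombineGo]
              rw [← this]
              simp
      | some a =>
          have hsegs : (some a :: xs).foldl argsSegsStep [[]] = (a :: h) :: t := by
            have : argsSegsStep [[]] (some a) = [[a]] := by simp [argsSegsStep]
            simp only [List.foldl_cons, this]
            obtain ⟨h', t', h1', h2', _⟩ := argsSegs_char xs [a]
            have hh : h = h' ∧ t = t' := by
              have := h2.symm.trans h2'
              exact ⟨by simpa using congrArg (fun l => l.headD []) this,
                     by simpa using congrArg List.tail this⟩
            rw [← hh.1, ← hh.2] at h1'
            rw [h1']; rfl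
          have hpre' : xs.count none ≤ args2.length := by
            simpa [List.count_cons] using hpre
          have := ih args2 hpre'
          simp only [argsCombine_alt, hsegs, h2] at this ⊢
          simp only [List.headD, List.tail, List.length_cons] at this ⊢
          simp only [Nat.add_sub_cancel] at this ⊢
          rw [argsCombineGo, ← this]
          simp

-- ===== VERDICT (by name: the statement is the Claim_ definition above) =====
theorem argsCombine_spec : Claim_equal_argsCombine := by
  intro args1 args2 _ hpre
  show argsCombine args1 args2 = argsCombine_alt args1 args2
  rw [argsCombine_eq_go, argsCombine_alt_eq_go args1 args2 hpre]
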